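-- pv_equiv track=rewrite | github.com/jk4837/ShowDefinitionEx | ShowDefinition.py | file_related
-- ===== SOURCE A (Python) =====
-- def file_related(ex1, ex2):
-- 	related_list = [['h', 'c', 'hpp', 'cpp'], ['js', 'css'], ['py', 'pyc'], ['php'], ['cs'], ['pl']]
-- 	if ex1 == ex2:
-- 		return True
-- 	for r_list in related_list:
-- 		rt1 = True if ex1 in r_list else False
-- 		rt2 = True if ex2 in r_list else False
-- 		if rt1 and rt2:
-- 			return True
-- 		elif not rt1 and not rt2:
-- 			continue
-- 	return False
-- ===== SOURCE B (Python) =====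
-- def file_related(ex1, ex2):
-- 	related_list = [['h', 'c', 'hpp', 'cpp'], ['js', 'css'], ['py', 'pyc'], ['php'], ['cs'], ['pl']]
-- 	if ex1 == ex2:
-- 		return True
-- 	idx = {}
-- 	for i, r_list in enumerate(related_list):
-- 		for ext in r_list:
-- 			idx[ext] = i
-- 	g1 = idx.get(ex1)
-- 	g2 = idx.get(ex2)
-- 	return g1 is not None and g1 == g2
-- ===== Notes on version B (the rewrite author's own statement) =====
-- stated objective: simpler
-- what changed: Replaced the per-group double-membership scan with a one-pass extension-to-group-index dict followed by two lookups compared for equality.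
import Mathlib
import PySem

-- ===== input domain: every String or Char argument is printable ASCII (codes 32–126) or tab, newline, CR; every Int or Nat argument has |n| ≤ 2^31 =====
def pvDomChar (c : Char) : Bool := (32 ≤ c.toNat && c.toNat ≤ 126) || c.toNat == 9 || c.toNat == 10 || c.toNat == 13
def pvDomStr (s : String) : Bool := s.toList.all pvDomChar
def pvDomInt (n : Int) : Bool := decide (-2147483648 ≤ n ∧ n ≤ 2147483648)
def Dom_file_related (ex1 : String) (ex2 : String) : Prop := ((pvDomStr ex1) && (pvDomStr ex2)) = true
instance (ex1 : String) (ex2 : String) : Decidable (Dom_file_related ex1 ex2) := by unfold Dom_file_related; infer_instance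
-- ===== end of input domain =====

-- B replaces A's per-group double-membership scan with a one-pass ext→group-index dict and two lookups (objective: simpler).

-- ===== PORT A =====
def relatedListA : List (List String) :=
  [["h", "c", "hpp", "cpp"], ["js", "css"], ["py", "pyc"], ["php"], ["cs"], ["pl"]]

-- A's for-loop over related_list, step for step
def fileRelatedLoopA (ex1 ex2 : String) : List (List String) → Bool
  | [] => false
  | rList :: rest =>
    let rt1 : Bool := if rList.contains ex1 then true else false
    let rt2 : Bool := if rList.contains ex2 then true else false
    if rt1 && rt2 then true
    else if !rt1 && !rt2 then fileRelatedLoopA ex1 ex2 rest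
    else fileRelatedLoopA ex1 ex2 rest

def file_related (ex1 : String) (ex2 : String) : Bool :=
  if ex1 == ex2 then true
  else fileRelatedLoopA ex1 ex2 relatedListA

-- ===== PORT B =====
def relatedListB : List (List String) :=
  [["h", "c", "hpp", "cpp"], ["js", "css"], ["py", "pyc"], ["php"], ["cs"], ["pl"]]

def file_related_alt (ex1 : String) (ex2 : String) : Bool :=
  if ex1 == ex2 then true
  else
    let idx : PySem.Dict String Int :=
      (PySem.List.enumerate relatedListB).foldl
        (fun d p => p.2.foldl (fun d' ext => d'.insert ext p.1) d) PySem.Dict.empty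
    let g1 := idx.get? ex1
    let g2 := idx.get? ex2
    g1.isSome && g1 == g2

-- ===== PRECONDITION & SPEC =====
def Spec_file_related (ex1 : String) (ex2 : String) (out : Bool) : Prop := out = file_related_alt ex1 ex2
instance (ex1 : String) (ex2 : String) (out : Bool) : Decidable (Spec_file_related ex1 ex2 out) := by unfold Spec_file_related; infer_instance

-- ===== CLAIM (what is proved, stated in full; the proofs are below) =====
def Claim_equal_file_related : Prop := ∀ (ex1 : String) (ex2 : String), Dom_file_related ex1 ex2 → Spec_file_related ex1 ex2 (file_related ex1 ex2)

-- ===== LEMMAS AND PROOFS =====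

def allExts : List String := ["h", "c", "hpp", "cpp", "js", "css", "py", "pyc", "php", "cs", "pl"]

-- A's loop returns false on a list of groups none of which contains ex1
theorem loopA_false_left (ex1 ex2 : String) :
    ∀ L : List (List String), (∀ g ∈ L, g.contains ex1 = false) →
      fileRelatedLoopA ex1 ex2 L = false
  | [], _ => rfl
  | r :: rest, h => by
    have hc : r.contains ex1 = false := h r (by simp)
    have ih := loopA_false_left ex1 ex2 rest (fun g hg => h g (by simp [hg]))
    simp only [fileRelatedLoopA, hc, ih]
    simp

-- A's loop returns false on a list of groups none of which contains ex2
theorem loopA_false_right (ex1 ex2 : String) :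
    ∀ L : List (List String), (∀ g ∈ L, g.contains ex2 = false) →
      fileRelatedLoopA ex1 ex2 L = false
  | [], _ => rfl
  | r :: rest, h => by
    have hc : r.contains ex2 = false := h r (by simp)
    have ih := loopA_false_right ex1 ex2 rest (fun g hg => h g (by simp [hg]))
    simp only [fileRelatedLoopA, hc, ih]
    simp

-- an extension outside allExts is in no group
theorem notmem_groups (ex : String) (h : ex ∉ allExts) :
    ∀ g ∈ relatedListA, g.contains ex = false := by
  simp only [allExts, List.mem_cons, List.not_mem_nil, or_false, not_or] at h
  obtain ⟨n1, n2, n3, n4, n5, n6, n7, n8, n9, n10, n11⟩ := h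
  intro g hg
  fin_cases hg <;>
    simp only [List.contains_cons, List.contains_nil, Bool.or_false, Bool.or_eq_false_iff,
      beq_eq_false_iff_ne, ne_eq] <;> and_intros <;> assumption

-- B's index dict, evaluated
theorem idx_eval :
    (PySem.List.enumerate relatedListB).foldl
        (fun d p => p.2.foldl (fun d' ext => d'.insert ext p.1) d) PySem.Dict.empty =
      PySem.Dict.mk [("h", 0), ("c", 0), ("hpp", 0), ("cpp", 0), ("js", 1), ("css", 1),
        ("py", 2), ("pyc", 2), ("php", 3), ("cs", 4), ("pl", 5)] := by
  decide

-- B's lookup misses for an extension in no group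
theorem idx_get?_none (ex : String) (h : ex ∉ allExts) :
    (PySem.Dict.mk [("h", (0 : Int)), ("c", 0), ("hpp", 0), ("cpp", 0), ("js", 1), ("css", 1),
        ("py", 2), ("pyc", 2), ("php", 3), ("cs", 4), ("pl", 5)]).get? ex = none := by
  simp only [allExts, List.mem_cons, List.not_mem_nil, or_false, not_or] at h
  obtain ⟨n1, n2, n3, n4, n5, n6, n7, n8, n9, n10, n11⟩ := h
  simp [PySem.Dict.get?, Ne.symm n1, Ne.symm n2, Ne.symm n3,
    Ne.symm n4, Ne.symm n5, Ne.symm n6, Ne.symm n7, Ne.symm n8, Ne.symm n9, Ne.symm n10,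
    Ne.symm n11]

theorem key (ex1 ex2 : String) : file_related ex1 ex2 = file_related_alt ex1 ex2 := by
  by_cases heq : ex1 = ex2
  · simp [file_related, file_related_alt, heq]
  · by_cases h1 : ex1 ∈ allExts
    · by_cases h2 : ex2 ∈ allExts
      · fin_cases h1 <;> fin_cases h2 <;> first | (exact absurd rfl heq) | decide
      · rw [file_related, file_related_alt, if_neg (by simp [heq]), if_neg (by simp [heq]),
          loopA_false_right ex1 ex2 relatedListA (notmem_groups ex2 h2)]
        simp only [idx_eval, idx_get?_none ex2 h2]
        cases (PySem.Dict.mk [("h", (0 : Int)), ("c", 0), ("hpp", 0), ("cpp", 0), ("js", 1),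
            ("css", 1), ("py", 2), ("pyc", 2), ("php", 3), ("cs", 4), ("pl", 5)]).get? ex1 <;> simp
    · rw [file_related, file_related_alt, if_neg (by simp [heq]), if_neg (by simp [heq]),
        loopA_false_left ex1 ex2 relatedListA (notmem_groups ex1 h1)]
      simp [idx_eval, idx_get?_none ex1 h1]

-- ===== VERDICT (by name: the statement is the Claim_ definition above) =====
theorem file_related_spec : Claim_equal_file_related := by
  intro ex1 ex2 _
  exact key ex1 ex2
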